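-- pv_equiv track=rewrite | github.com/kt-latimer/20supersat | src/halo/mei_compare_dsds_figsrc.py | get_start_end_inds
-- ===== SOURCE A (Python) =====
-- def get_start_end_inds(cdp_t, start_times, end_times):
--
--     start_inds = []
--     end_inds = []
--
--     for i, t in enumerate(cdp_t):
--         if t in start_times:
--             start_inds.append(i)
--         elif t in end_times:
--             end_inds.append(i)
--
--     return start_inds, end_inds
-- ===== SOURCE B (Python) =====
-- def get_start_end_inds(cdp_t, start_times, end_times):
--     # Inverted index: each distinct time -> ascending list of its positions.
--     index = {}
--     for i, t in enumerate(cdp_t):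
--         index.setdefault(t, []).append(i)
--
--     s_vals = set(start_times)
--     e_vals = set(end_times) - s_vals  # elif priority: start wins
--
--     start_inds = sorted(i for v in s_vals for i in index.get(v, []))
--     end_inds = sorted(i for v in e_vals for i in index.get(v, []))
--     return start_inds, end_inds
-- ===== Notes on version B (the rewrite author's own statement) =====
-- stated objective: faster
-- what changed: Instead of scanning cdp_t with linear per-element list-membership tests, B builds an inverted index (dict from each distinct time to its ascending positions), looks up the deduplicated query sets (end minus start to keep the elif priority) in it, and sorts the gathered positions back into index order.
import Mathlib
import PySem

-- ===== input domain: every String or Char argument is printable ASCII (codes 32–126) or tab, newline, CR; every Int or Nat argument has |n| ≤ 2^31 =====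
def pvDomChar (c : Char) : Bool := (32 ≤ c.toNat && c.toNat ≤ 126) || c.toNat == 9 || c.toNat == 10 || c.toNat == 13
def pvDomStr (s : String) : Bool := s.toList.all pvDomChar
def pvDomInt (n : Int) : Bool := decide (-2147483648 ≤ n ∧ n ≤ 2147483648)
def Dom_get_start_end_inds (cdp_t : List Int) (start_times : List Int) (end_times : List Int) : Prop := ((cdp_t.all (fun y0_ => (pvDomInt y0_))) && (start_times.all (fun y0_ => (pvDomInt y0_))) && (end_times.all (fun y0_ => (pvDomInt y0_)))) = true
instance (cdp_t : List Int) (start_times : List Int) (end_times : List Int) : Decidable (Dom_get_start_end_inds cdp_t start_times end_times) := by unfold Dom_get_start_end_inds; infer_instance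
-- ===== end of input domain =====

-- B replaces A's scan-with-list-membership by an inverted index (value -> ascending positions):
-- query-time sets are looked up in the index and the gathered positions are sorted back into index order.

-- ===== PORT A =====
def get_start_end_inds (cdp_t : List Int) (start_times : List Int) (end_times : List Int) : List Int × List Int :=
  (PySem.List.enumerate cdp_t).foldl
    (fun (acc : List Int × List Int) p =>
      if start_times.contains p.2 then (acc.1 ++ [p.1], acc.2)
      else if end_times.contains p.2 then (acc.1, acc.2 ++ [p.1])
      else acc) ([], [])

-- ===== PORT B =====
-- The two comprehensions iterate over Python sets; their results are sorted, so they do not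
-- depend on the set iteration order (the gathered position lists are disjoint across distinct values).
def get_start_end_inds_alt (cdp_t : List Int) (start_times : List Int) (end_times : List Int) : List Int × List Int :=
  let index : PySem.Dict Int (List Int) :=
    (PySem.List.enumerate cdp_t).foldl (fun d p => d.modify p.2 [] (· ++ [p.1])) PySem.Dict.empty
  let sVals : PySem.Set Int := PySem.Set.ofList start_times
  let eVals : PySem.Set Int := PySem.Set.diff (PySem.Set.ofList end_times) sVals
  let startInds := PySem.List.sorted (sVals.flatMap (fun v => index.getD v [])) (fun x => x) false
  let endInds := PySem.List.sorted (eVals.flatMap (fun v => index.getD v [])) (fun x => x) false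
  (startInds, endInds)

-- ===== PRECONDITION & SPEC =====
def Spec_get_start_end_inds (cdp_t : List Int) (start_times : List Int) (end_times : List Int) (out : List Int × List Int) : Prop := out = get_start_end_inds_alt cdp_t start_times end_times
instance (cdp_t : List Int) (start_times : List Int) (end_times : List Int) (out : List Int × List Int) : Decidable (Spec_get_start_end_inds cdp_t start_times end_times out) := by unfold Spec_get_start_end_inds; infer_instance

-- ===== CLAIM (what is proved, stated in full; the proofs are below) =====
def Claim_equal_get_start_end_inds : Prop := ∀ (cdp_t : List Int) (start_times : List Int) (end_times : List Int), Dom_get_start_end_inds cdp_t start_times end_times → Spec_get_start_end_inds cdp_t start_times end_times (get_start_end_inds cdp_t start_times end_times)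

-- ===== LEMMAS AND PROOFS =====

-- A's loop, run from arbitrary accumulators, appends exactly the filtered indices.
theorem pvLoopA (start_times end_times : List Int) (l : List (Int × Int)) (a b : List Int) :
    l.foldl
      (fun (acc : List Int × List Int) p =>
        if start_times.contains p.2 then (acc.1 ++ [p.1], acc.2)
        else if end_times.contains p.2 then (acc.1, acc.2 ++ [p.1])
        else acc) (a, b)
    = (a ++ (l.filter (fun p => start_times.contains p.2)).map (fun p => p.1),
       b ++ (l.filter (fun p => !start_times.contains p.2 && end_times.contains p.2)).map (fun p => p.1)) := by
  induction l generalizing a b with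
  | nil => simp
  | cons x l ih =>
    rw [List.foldl_cons]
    by_cases hs : x.2 ∈ start_times
    · rw [if_pos (by simpa using hs), ih]
      simp [hs]
    · by_cases he : x.2 ∈ end_times
      · rw [if_neg (by simpa using hs), if_pos (by simpa using he), ih]
        simp [hs, he]
      · rw [if_neg (by simpa using hs), if_neg (by simpa using he), ih]
        simp [hs, he]

-- B's index lookup: the positions stored under v are exactly the indices whose time is v.
theorem pvIndexGetD (cdp_t : List Int) (v : Int) :
    ((PySem.List.enumerate cdp_t).foldl (fun d p => d.modify p.2 [] (· ++ [p.1]))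
        (PySem.Dict.empty : PySem.Dict Int (List Int))).getD v []
      = (((PySem.List.enumerate cdp_t).filter (fun p => p.2 == v)).map (fun p => p.1)) := by
  have hswap : (PySem.List.enumerate cdp_t).foldl
      (fun (d : PySem.Dict Int (List Int)) p => d.modify p.2 [] (· ++ [p.1])) PySem.Dict.empty
      = ((PySem.List.enumerate cdp_t).map Prod.swap).foldl
          (fun d p => d.modify p.1 [] (· ++ [p.2])) PySem.Dict.empty := by
    rw [List.foldl_map]
    rfl
  rw [hswap, PySem.Dict.getD_foldl_modify_append]
  simp [List.filter_map, List.map_map, Function.comp_def, Prod.swap]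

-- Splitting a filter over a disjunction of disjoint tests, up to permutation.
theorem pvFilterOr {α : Type} (l : List α) (q r : α → Bool) (h : ∀ x, q x = true → r x = false) :
    (l.filter (fun x => q x || r x)).Perm (l.filter q ++ l.filter r) := by
  induction l with
  | nil => simp
  | cons x l ih =>
    by_cases hq : q x = true
    · have hr := h x hq
      simp [hq, hr]
      exact ih
    · by_cases hr : r x = true
      · simp [hq, hr]
        exact (ih.cons x).trans List.perm_middle.symm
      · simp [hq, hr]
        exact ih

-- Gathering the per-value position lists over a duplicate-free value list is, up to permutation,
-- one filter of the enumerated list.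
theorem pvFlatMapPerm (E : List (Int × Int)) (S : List Int) (hnd : S.Nodup) :
    (S.flatMap (fun v => (E.filter (fun p => p.2 == v)).map (fun p => p.1))).Perm
      ((E.filter (fun p => S.contains p.2)).map (fun p => p.1)) := by
  induction S with
  | nil => simp
  | cons v S ih =>
    have hv : v ∉ S := (List.nodup_cons.mp hnd).1
    have hnd' : S.Nodup := (List.nodup_cons.mp hnd).2
    have hsplit : (E.filter (fun p => (v :: S).contains p.2)).Perm
        (E.filter (fun p => p.2 == v) ++ E.filter (fun p => S.contains p.2)) := by
      have := pvFilterOr E (fun p => p.2 == v) (fun p => S.contains p.2)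
        (fun p hp => by
          have : p.2 = v := by simpa using hp
          simp [this, hv])
      simpa [List.contains_cons] using this
    rw [List.flatMap_cons]
    refine ((ih hnd').append_left _).trans ?_
    rw [← List.map_append]
    exact (hsplit.map _).symm

-- Indices filtered out of an enumeration are strictly increasing.
theorem pvFilteredPairwise (cdp_t : List Int) (p : Int × Int → Bool) :
    (((PySem.List.enumerate cdp_t).filter p).map (fun q => q.1)).Pairwise (· < ·) := by
  exact ((PySem.List.pairwise_lt_enumerate cdp_t 0).sublist List.filter_sublist).map _ (fun _ _ h => h)

-- One side of B: sorting the gathered positions of a duplicate-free value list S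
-- yields the filter of the enumeration by membership in S.
theorem pvSide (cdp_t : List Int) (S : List Int) (hnd : S.Nodup) :
    PySem.List.sorted
      (S.flatMap (fun v =>
        ((PySem.List.enumerate cdp_t).foldl (fun d p => d.modify p.2 [] (· ++ [p.1]))
          (PySem.Dict.empty : PySem.Dict Int (List Int))).getD v [])) (fun x => x) false
    = ((PySem.List.enumerate cdp_t).filter (fun p => S.contains p.2)).map (fun p => p.1) := by
  have hmap : (S.flatMap (fun v =>
      ((PySem.List.enumerate cdp_t).foldl (fun d p => d.modify p.2 [] (· ++ [p.1]))
        (PySem.Dict.empty : PySem.Dict Int (List Int))).getD v []))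
      = S.flatMap (fun v => ((PySem.List.enumerate cdp_t).filter (fun p => p.2 == v)).map (fun p => p.1)) := by
    exact List.flatMap_congr (fun v _ => pvIndexGetD cdp_t v)
  rw [hmap]
  exact PySem.List.sorted_eq_of_perm_of_pairwise_lt _ _ _
    (pvFlatMapPerm _ S hnd).symm (pvFilteredPairwise cdp_t _)

-- ===== VERDICT (by name: the statement is the Claim_ definition above) =====
theorem get_start_end_inds_spec : Claim_equal_get_start_end_inds := by
  intro cdp_t start_times end_times _
  unfold Spec_get_start_end_inds get_start_end_inds get_start_end_inds_alt
  rw [pvLoopA]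
  simp only [List.nil_append]
  have hSnd : (PySem.Set.diff (PySem.Set.ofList end_times) (PySem.Set.ofList start_times)).Nodup := by
    exact (PySem.Set.nodup_ofList end_times).filter _
  rw [pvSide cdp_t (PySem.Set.ofList start_times) (PySem.Set.nodup_ofList start_times),
      pvSide cdp_t _ hSnd]
  simp only [Prod.mk.injEq]
  constructor
  · refine congrArg (List.map (fun p : Int × Int => p.1)) (List.filter_congr ?_)
    intro p _
    by_cases h : p.2 ∈ start_times <;> simp [PySem.Set.mem_ofList, h]
  · refine congrArg (List.map (fun p : Int × Int => p.1)) (List.filter_congr ?_)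
    intro p _
    by_cases hs : p.2 ∈ start_times <;> by_cases he : p.2 ∈ end_times <;>
      simp [PySem.Set.mem_diff, PySem.Set.mem_ofList, hs, he]
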